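-- pv_equiv track=rewrite | github.com/yonsweng/ps | codeforces/1591/a.py | solve
-- ===== SOURCE A (Python) =====
-- def solve(n, a):
--     answer = 1
--     prev = -1
--     for ai in a:
--         if ai == 0:
--             if prev == 0:
--                 return -1
--         else:
--             if prev != 1:
--                 answer += 1
--             else:
--                 answer += 5
--         prev = ai
--     return answer
-- ===== SOURCE B (Python) =====
-- def solve(n, a):
--     # Run-decomposition: each maximal nonzero run of length L contributes
--     # L + 4 * (number of 1s in the run excluding its last element); two
--     # adjacent zeros mean -1.
--     total = 1
--     rest = list(a)
--     while rest:
--         if rest[0] == 0: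
--             if len(rest) > 1 and rest[1] == 0:
--                 return -1
--             rest = rest[1:]
--         else:
--             j = next((k for k, x in enumerate(rest) if x == 0), len(rest))
--             total += j + 4 * rest[:j - 1].count(1)
--             rest = rest[j:]
--     return total
-- ===== Notes on version B (the rewrite author's own statement) =====
-- stated objective: alternative
-- what changed: Replaces A's per-element stateful scan (prev-based +1/+5 per element, early return) by a run decomposition: skip to each maximal nonzero run at once and score it arithmetically as length + 4*(count of 1s excluding the run's last element), returning -1 only when a zero is immediately followed by a zero.
import Mathlib
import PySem

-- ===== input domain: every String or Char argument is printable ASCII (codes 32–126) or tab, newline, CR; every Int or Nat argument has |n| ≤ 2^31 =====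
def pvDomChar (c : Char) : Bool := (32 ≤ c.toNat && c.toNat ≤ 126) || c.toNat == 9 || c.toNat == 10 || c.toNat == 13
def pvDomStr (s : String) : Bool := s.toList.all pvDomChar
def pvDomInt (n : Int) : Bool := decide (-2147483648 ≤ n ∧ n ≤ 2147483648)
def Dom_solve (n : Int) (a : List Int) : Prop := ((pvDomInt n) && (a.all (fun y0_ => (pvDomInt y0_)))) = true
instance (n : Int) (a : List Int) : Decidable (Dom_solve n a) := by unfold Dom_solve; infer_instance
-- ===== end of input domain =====

-- B replaces A's per-element stateful scan by a run decomposition: it jumps to each maximal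
-- nonzero run and scores it arithmetically (length + 4 * count of 1s excluding the run's last
-- element), returning -1 when a zero is immediately followed by a zero. Same values everywhere.

-- ===== PORT A =====
-- the for-loop of A: state (answer, prev), early return -1
def solveGo : List Int → Int → Int → Int
  | [], answer, _ => answer
  | ai :: rest, answer, prev =>
    if ai == 0 then
      if prev == 0 then -1 else solveGo rest answer ai
    else
      if prev != 1 then solveGo rest (answer + 1) ai else solveGo rest (answer + 5) ai

def solve (n : Int) (a : List Int) : Int := solveGo a 1 (-1)

-- ===== PORT B =====
-- B's while loop over the remaining suffix `rest`:
--   head zero: check the next element, then drop one;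
--   head nonzero: j = index of first zero (or length), score the run arithmetically, drop j.
def solveAltGo (rest : List Int) (total : Int) : Int :=
  match rest with
  | [] => total
  | x :: tail =>
    if x == 0 then
      if tail.head? == some 0 then -1
      else solveAltGo tail total
    else
      let j := (x :: tail).findIdx (· == 0)
      solveAltGo ((x :: tail).drop j)
        (total + (j : Int) + 4 * (((x :: tail).take (j - 1)).count 1))
termination_by rest.length
decreasing_by
  · simp
  · have hx : (x == 0) = false := by simpa using (by simpa using ‹¬ (x == 0) = true›)
    have hj : 1 ≤ j := by
      simp only [j, List.findIdx_cons, hx, cond_false]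
      omega
    simp only [List.length_drop, List.length_cons]
    omega

def solve_alt (n : Int) (a : List Int) : Int := solveAltGo a 1

-- ===== PRECONDITION & SPEC =====
def Spec_solve (n : Int) (a : List Int) (out : Int) : Prop := out = solve_alt n a
instance (n : Int) (a : List Int) (out : Int) : Decidable (Spec_solve n a out) := by unfold Spec_solve; infer_instance

-- ===== CLAIM (what is proved, stated in full; the proofs are below) =====
def Claim_equal_solve : Prop := ∀ (n : Int) (a : List Int), Dom_solve n a → Spec_solve n a (solve n a)

-- ===== LEMMAS AND PROOFS =====

-- characterisation of A's loop: a "bad" predicate and a pure score, relative to prev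
def badFrom (p : Int) : List Int → Bool
  | [] => false
  | x :: rest => (x == 0 && p == 0) || badFrom x rest

def score (p : Int) : List Int → Int
  | [] => 0
  | x :: rest => (if x ≠ 0 then (if p == 1 then 5 else 1) else 0) + score x rest

theorem solveGo_eq (a : List Int) : ∀ (ans p : Int),
    solveGo a ans p = if badFrom p a then -1 else ans + score p a := by
  induction a with
  | nil => intro ans p; simp [solveGo, badFrom, score]
  | cons x rest ih =>
    intro ans p
    by_cases hx : x = 0
    · subst hx
      by_cases hp : p = 0 <;> simp [solveGo, badFrom, score, hp, ih]
    · by_cases hp : p = 1 <;>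
        · simp [solveGo, badFrom, score, hx, hp, ih]
          split <;> ring_nf

-- badFrom only consults p via p = 0, and only at a zero head
theorem badFrom_congr (l : List Int) (p q : Int) (hp : p ≠ 0) (hq : q ≠ 0) :
    badFrom p l = badFrom q l := by
  cases l with
  | nil => rfl
  | cons x t =>
    have hp0 : (p == 0) = false := by simp [hp]
    have hq0 : (q == 0) = false := by simp [hq]
    simp [badFrom, hp0, hq0]

-- score only consults p via p = 1
theorem score_congr (l : List Int) (p q : Int) (hp : p ≠ 1) (hq : q ≠ 1) :
    score p l = score q l := by
  cases l with
  | nil => rfl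
  | cons x t => simp [score, hp, hq]

-- findIdx of the first zero = length of the nonzero prefix
theorem findIdx_zero_eq (l : List Int) :
    l.findIdx (· == 0) = (l.takeWhile (fun x => x != 0)).length := by
  induction l with
  | nil => simp
  | cons x t ih =>
    by_cases h : x = 0
    · simp [List.findIdx_cons, h]
    · have hx : (x == 0) = false := by simp [h]
      have hx' : (x != 0) = true := by simp [h]
      simp [List.findIdx_cons, hx, hx', ih]

-- crossing a maximal nonzero run: the bad check skips it
theorem badFrom_run : ∀ (run : List Int) (p r : Int), (∀ y ∈ run, y ≠ 0) → r ≠ 0 →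
    ∀ rest, badFrom r (run ++ rest) = badFrom (-1) rest := by
  intro run
  induction run with
  | nil => intro p r _ hr rest; exact badFrom_congr rest r (-1) hr (by norm_num)
  | cons s rs ih =>
    intro p r h hr rest
    have hs : s ≠ 0 := h s (by simp)
    have hr0 : (r == 0) = false := by simp [hr]
    have hs0 : (s == 0) = false := by simp [hs]
    simp only [List.cons_append, badFrom, hr0, hs0, Bool.and_false, Bool.false_or]
    simpa [hs0] using ih p s (fun y hy => h y (by simp [hy])) hs rest
-- crossing a maximal nonzero run: the score is arithmetic in the run
theorem score_run : ∀ (run : List Int) (r : Int), (∀ y ∈ run, y ≠ 0) → r ≠ 0 →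
    ∀ rest, (rest = [] ∨ rest.head? = some 0) →
    score r (run ++ rest) =
      (run.length : Int) + 4 * ((r :: run).dropLast.count 1 : Int) + score (-1) rest := by
  intro run
  induction run with
  | nil =>
    intro r _ hr rest hrest
    rcases hrest with h | h
    · subst h; simp [score]
    · cases rest with
      | nil => simp at h
      | cons z t =>
        have hz : z = 0 := by simpa using h
        subst hz; simp [score]
  | cons s rs ih =>
    intro r h hr rest hrest
    have hs : s ≠ 0 := h s (by simp)
    have hrec := ih s (fun y hy => h y (by simp [hy])) hs rest hrest
    have hdl : ((r :: s :: rs).dropLast.count 1 : Int)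
        = (if r = 1 then 1 else 0) + ((s :: rs).dropLast.count 1 : Int) := by
      simp only [List.dropLast_cons_of_ne_nil (List.cons_ne_nil s rs), List.count_cons]
      by_cases hr1 : r = 1 <;> push_cast <;> simp [hr1] <;> ring
    simp only [List.cons_append, score, hs, ne_eq, not_false_iff, if_true, hrec, hdl,
      List.length_cons]
    by_cases hr1 : r = 1 <;> simp [hr1] <;> push_cast <;> ring

-- the dropWhile suffix starts with a zero (or is empty)
theorem dropWhile_zero_head : ∀ l : List Int,
    l.dropWhile (fun y => y != 0) = [] ∨ (l.dropWhile (fun y => y != 0)).head? = some 0 := by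
  intro l
  induction l with
  | nil => exact Or.inl rfl
  | cons x t ih =>
    by_cases hx : x = 0
    · right; simp [hx]
    · simpa [List.dropWhile_cons, hx] using ih

-- main invariant of B's loop
theorem solveAltGo_eq (l : List Int) (total : Int) :
    solveAltGo l total = if badFrom (-1) l then -1 else total + score (-1) l := by
  cases hl : l with
  | nil => simp [solveAltGo, badFrom, score]
  | cons x tail =>
    by_cases hx : x = 0
    · subst hx
      rcases htl : tail.head? with _ | y
      · -- tail = []
        have : tail = [] := by cases tail <;> simp_all
        subst this
        simp [solveAltGo, badFrom, score]
      · by_cases hy : y = 0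
        · subst hy
          obtain ⟨t, rfl⟩ : ∃ t, tail = 0 :: t := by
            cases tail <;> simp_all
          simp [solveAltGo, badFrom]
        · have hrec := solveAltGo_eq tail total
          have hbad : badFrom (0 : Int) tail = badFrom (-1) tail := by
            cases tail with
            | nil => rfl
            | cons z t =>
              have hz : z ≠ 0 := by simp_all
              simp [badFrom, hz]
          have hsc : score (0 : Int) tail = score (-1) tail :=
            score_congr tail 0 (-1) (by norm_num) (by norm_num)
          simp [solveAltGo, htl, hy, hrec, badFrom, score, hbad, hsc]
    · -- nonzero head: cross the whole run at once
      have hx' : (x != 0) = true := by simp [hx]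
      set rs := tail.takeWhile (fun y => y != 0) with hrs
      set rest := tail.dropWhile (fun y => y != 0) with hrest
      have hsplit : x :: tail = (x :: rs) ++ rest := by
        simp [hrs, hrest, List.takeWhile_append_dropWhile]
      have hrun_ne : ∀ y ∈ rs, y ≠ 0 := by
        intro y hy
        have := List.mem_takeWhile_imp hy
        simpa using this
      have hresthead : rest = [] ∨ rest.head? = some 0 := dropWhile_zero_head tail
      have hj : (x :: tail).findIdx (· == 0) = rs.length + 1 := by
        rw [findIdx_zero_eq]
        simp [hx', hrs]
      have hdrop : (x :: tail).drop (rs.length + 1) = rest := by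
        conv_lhs => rw [hsplit]
        simpa using List.drop_left (x :: rs) rest
      have htake : (x :: tail).take (rs.length + 1 - 1) = (x :: rs).dropLast := by
        conv_lhs => rw [hsplit]
        rw [Nat.add_sub_cancel,
            List.take_append_of_le_length (by simp),
            List.dropLast_eq_take]
        simp
      have hlen : rest.length < (x :: tail).length := by
        have h1 := List.length_dropWhile_le (fun y => y != 0) tail
        simp only [List.length_cons, hrest]
        omega
      have hrec := solveAltGo_eq rest
        (total + ((rs.length + 1 : Nat) : Int) + 4 * (((x :: rs).dropLast.count 1 : Nat) : Int))
      have hbad : badFrom (-1) (x :: tail) = badFrom (-1) rest := by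
        rw [hsplit]
        simpa [List.cons_append, badFrom, hx] using
          badFrom_run rs (-1) x hrun_ne hx rest
      have hsc : score (-1) (x :: tail)
          = ((rs.length : Int) + 1) + 4 * ((x :: rs).dropLast.count 1 : Int) + score (-1) rest := by
        rw [hsplit]
        have := score_run rs x hrun_ne hx rest hresthead
        simp only [List.cons_append, score, hx, ne_eq, not_false_iff, if_true, this]
        norm_num
        ring
      show solveAltGo (x :: tail) total = _
      rw [show solveAltGo (x :: tail) total
            = solveAltGo ((x :: tail).drop ((x :: tail).findIdx (· == 0)))
                (total + (((x :: tail).findIdx (· == 0) : Nat) : Int)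
                  + 4 * ((((x :: tail).take ((x :: tail).findIdx (· == 0) - 1)).count 1 : Nat) : Int))
          from by rw [solveAltGo]; simp [hx]]
      rw [hj, hdrop, htake, hrec, hbad, hsc]
      by_cases hb : badFrom (-1) rest = true <;> simp [hb] <;> push_cast <;> ring
termination_by l.length
decreasing_by
  · simp
  · exact hlen

-- ===== VERDICT (by name: the statement is the Claim_ definition above) =====
theorem solve_spec : Claim_equal_solve := by
  intro n a _
  unfold Spec_solve solve solve_alt
  rw [solveGo_eq, solveAltGo_eq]
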